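-- pv_equiv track=rewrite | github.com/achal-vijayvargiya/Aahaar | backend/app/platform/knowledge_base/foods/import_exchange_profile_to_food_kb.py | map_to_iet_exchange_category
-- ===== SOURCE A (Python) =====
-- from typing import Dict, List, Optional, Any
--
-- CSV_EXCHANGE_TO_IET_CATEGORY = {
--     # IET exchange categories
--     "cereals_and_millets": "cereal",
--     "cereals and millets": "cereal",
--     "grain_legumes": "pulse",
--     "grain legumes": "pulse",
--     "fruits": "fruit",
--     "green_leafy_vegetables": "vegetable_non_starchy",
--     "green leafy vegetables": "vegetable_non_starchy",
--     "other_vegetables": "vegetable_non_starchy",  # Default, will refine based on food name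
--     "other vegetables": "vegetable_non_starchy",
--     "roots_and_tubers": "vegetable_starchy",
--     "roots and tubers": "vegetable_starchy",
--     "nuts_and_oil_seeds": "nuts_seeds",
--     "nuts and oil seeds": "nuts_seeds",
--     "mushrooms": "vegetable_non_starchy",
--     # Foods that don't fit IET exchange system (return None)
--     "animal_meat": None,
--     "animal meat": None,
--     "poultry": None,
--     "marine_fish": None,
--     "marine fish": None,
--     "condiments_and_spices": None,
--     "condiments and spices": None,
--     "miscellaneous_foods": None,
--     "miscellaneous foods": None,
--     "egg_and_egg_products": None,
--     "egg and egg products": None,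
--     "sugars": None,
-- }
--
-- STARCHY_VEGETABLES = ["potato", "sweet potato", "yam", "taro", "arbi", "colocasia"]
--
-- def map_to_iet_exchange_category(category: Optional[str], food_name: str = "") -> Optional[str]:
--     """
--     Map food category to IET exchange category.
--
--     Returns one of the 8 IET exchange categories, or None if food doesn't fit exchange system.
--
--     Args:
--         category: Food category from kb_food_master (e.g., "cereals_and_millets")
--         food_name: Food name for refinement (e.g., to distinguish starchy vs non-starchy vegetables)
--
--     Returns:
--         IET exchange category or None
--     """
--     if not category:
--         # Try to infer from food name
--         food_lower = food_name.lower() if food_name else ""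
--
--         # Check for starchy vegetables
--         if any(veg in food_lower for veg in STARCHY_VEGETABLES):
--             return "vegetable_starchy"
--
--         # Check for common patterns
--         if any(term in food_lower for term in ["rice", "wheat", "oats", "millet", "bajra", "jowar", "ragi", "roti", "bread"]):
--             return "cereal"
--         if any(term in food_lower for term in ["dal", "lentil", "chana", "rajma", "moong", "masoor", "toor"]):
--             return "pulse"
--         if any(term in food_lower for term in ["milk", "curd", "yogurt", "buttermilk", "paneer", "cheese"]):
--             return "milk"
--         if any(term in food_lower for term in ["apple", "banana", "orange", "papaya", "mango", "guava"]):
--             return "fruit"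
--         if any(term in food_lower for term in ["almond", "peanut", "walnut", "cashew", "seed"]):
--             return "nuts_seeds"
--         if any(term in food_lower for term in ["oil", "ghee", "butter"]):
--             return "fat"
--
--         return None
--
--     # Normalize: lowercase, replace spaces with underscores
--     normalized = category.strip().lower().replace(" ", "_")
--
--     # Get IET category
--     iet_category = CSV_EXCHANGE_TO_IET_CATEGORY.get(normalized)
--
--     # Refine vegetable category based on food name
--     if iet_category == "vegetable_non_starchy":
--         food_lower = food_name.lower() if food_name else ""
--         if any(veg in food_lower for veg in STARCHY_VEGETABLES):
--             return "vegetable_starchy"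
--
--     return iet_category
-- ===== SOURCE B (Python) =====
-- from typing import Optional
--
-- CSV_EXCHANGE_TO_IET_CATEGORY = {
--     "cereals_and_millets": "cereal",
--     "cereals and millets": "cereal",
--     "grain_legumes": "pulse",
--     "grain legumes": "pulse",
--     "fruits": "fruit",
--     "green_leafy_vegetables": "vegetable_non_starchy",
--     "green leafy vegetables": "vegetable_non_starchy",
--     "other_vegetables": "vegetable_non_starchy",
--     "other vegetables": "vegetable_non_starchy",
--     "roots_and_tubers": "vegetable_starchy",
--     "roots and tubers": "vegetable_starchy",
--     "nuts_and_oil_seeds": "nuts_seeds",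
--     "nuts and oil seeds": "nuts_seeds",
--     "mushrooms": "vegetable_non_starchy",
--     "animal_meat": None,
--     "animal meat": None,
--     "poultry": None,
--     "marine_fish": None,
--     "marine fish": None,
--     "condiments_and_spices": None,
--     "condiments and spices": None,
--     "miscellaneous_foods": None,
--     "miscellaneous foods": None,
--     "egg_and_egg_products": None,
--     "egg and egg products": None,
--     "sugars": None,
-- }
--
-- # The 7 inferable IET categories, indexed by priority rank (0 = highest priority).
-- IET_CATEGORIES = ["vegetable_starchy", "cereal", "pulse", "milk", "fruit",
--                   "nuts_seeds", "fat"]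
--
-- # One flat keyword -> priority-rank map; the lowest rank among all keywords
-- # occurring in the food name decides the inferred category.
-- KEYWORD_RANK = {
--     "potato": 0, "sweet potato": 0, "yam": 0, "taro": 0, "arbi": 0, "colocasia": 0,
--     "rice": 1, "wheat": 1, "oats": 1, "millet": 1, "bajra": 1, "jowar": 1,
--     "ragi": 1, "roti": 1, "bread": 1,
--     "dal": 2, "lentil": 2, "chana": 2, "rajma": 2, "moong": 2, "masoor": 2, "toor": 2,
--     "milk": 3, "curd": 3, "yogurt": 3, "buttermilk": 3, "paneer": 3, "cheese": 3,
--     "apple": 4, "banana": 4, "orange": 4, "papaya": 4, "mango": 4, "guava": 4,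
--     "almond": 5, "peanut": 5, "walnut": 5, "cashew": 5, "seed": 5,
--     "oil": 6, "ghee": 6, "butter": 6,
-- }
--
--
-- def map_to_iet_exchange_category(category: Optional[str], food_name: str = "") -> Optional[str]:
--     food_lower = food_name.lower()
--     # Single aggregation pass: the minimum rank of any keyword found in the name.
--     best = None
--     for kw, rank in KEYWORD_RANK.items():
--         if kw in food_lower:
--             best = rank if best is None else min(best, rank)
--     if not category:
--         return IET_CATEGORIES[best] if best is not None else None
--     iet = CSV_EXCHANGE_TO_IET_CATEGORY.get(category.strip().lower().replace(" ", "_"))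
--     # rank 0 = a starchy-vegetable keyword occurs in the name
--     if iet == "vegetable_non_starchy" and best == 0:
--         return "vegetable_starchy"
--     return iet
-- ===== Notes on version B (the rewrite author's own statement) =====
-- stated objective: alternative
-- what changed: Name inference no longer walks A's ordered eight-branch any(...)-if cascade: B folds ONE flat keyword->priority-rank dict in a single aggregation pass taking the minimum matched rank, then indexes a category table by that rank; the category branch reuses the same aggregate (rank 0 = starchy keyword present) for the vegetable refinement instead of a separate starchy scan.
import Mathlib
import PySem

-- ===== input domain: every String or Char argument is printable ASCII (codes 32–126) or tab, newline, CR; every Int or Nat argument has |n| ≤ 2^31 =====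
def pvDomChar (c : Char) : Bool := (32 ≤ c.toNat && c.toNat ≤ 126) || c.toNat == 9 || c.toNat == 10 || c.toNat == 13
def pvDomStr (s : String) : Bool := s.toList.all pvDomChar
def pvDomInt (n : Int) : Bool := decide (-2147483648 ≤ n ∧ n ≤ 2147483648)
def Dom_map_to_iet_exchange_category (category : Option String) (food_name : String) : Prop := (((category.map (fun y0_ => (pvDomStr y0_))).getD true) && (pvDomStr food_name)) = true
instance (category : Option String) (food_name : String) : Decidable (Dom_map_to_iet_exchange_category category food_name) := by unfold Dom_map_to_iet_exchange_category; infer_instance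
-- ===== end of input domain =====

-- B replaces A's ordered eight-branch if cascade by one flat keyword→rank map folded in a
-- single aggregation pass (minimum matched rank), then indexes a category table; objective: alternative.

-- Module-level constant shared by both Pythons
def CSV_EXCHANGE_TO_IET_CATEGORY : PySem.Dict String (Option String) :=
  PySem.Dict.ofList [
    ("cereals_and_millets", some "cereal"),
    ("cereals and millets", some "cereal"),
    ("grain_legumes", some "pulse"),
    ("grain legumes", some "pulse"),
    ("fruits", some "fruit"),
    ("green_leafy_vegetables", some "vegetable_non_starchy"),
    ("green leafy vegetables", some "vegetable_non_starchy"),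
    ("other_vegetables", some "vegetable_non_starchy"),
    ("other vegetables", some "vegetable_non_starchy"),
    ("roots_and_tubers", some "vegetable_starchy"),
    ("roots and tubers", some "vegetable_starchy"),
    ("nuts_and_oil_seeds", some "nuts_seeds"),
    ("nuts and oil seeds", some "nuts_seeds"),
    ("mushrooms", some "vegetable_non_starchy"),
    ("animal_meat", none),
    ("animal meat", none),
    ("poultry", none),
    ("marine_fish", none),
    ("marine fish", none),
    ("condiments_and_spices", none),
    ("condiments and spices", none),
    ("miscellaneous_foods", none),
    ("miscellaneous foods", none),
    ("egg_and_egg_products", none),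
    ("egg and egg products", none),
    ("sugars", none)]

-- ===== PORT A =====
def STARCHY_VEGETABLES : List String := ["potato", "sweet potato", "yam", "taro", "arbi", "colocasia"]

-- the `if not category:` body of A: infer from food name through the if cascade
def pvInferA (food_name : String) : Option String :=
  let food_lower := if food_name ≠ "" then PySem.Str.lower food_name else ""
  if STARCHY_VEGETABLES.any (fun veg => PySem.Str.isIn veg food_lower) then some "vegetable_starchy"
  else if (["rice", "wheat", "oats", "millet", "bajra", "jowar", "ragi", "roti", "bread"] : List String).any (fun t => PySem.Str.isIn t food_lower) then some "cereal"
  else if (["dal", "lentil", "chana", "rajma", "moong", "masoor", "toor"] : List String).any (fun t => PySem.Str.isIn t food_lower) then some "pulse"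
  else if (["milk", "curd", "yogurt", "buttermilk", "paneer", "cheese"] : List String).any (fun t => PySem.Str.isIn t food_lower) then some "milk"
  else if (["apple", "banana", "orange", "papaya", "mango", "guava"] : List String).any (fun t => PySem.Str.isIn t food_lower) then some "fruit"
  else if (["almond", "peanut", "walnut", "cashew", "seed"] : List String).any (fun t => PySem.Str.isIn t food_lower) then some "nuts_seeds"
  else if (["oil", "ghee", "butter"] : List String).any (fun t => PySem.Str.isIn t food_lower) then some "fat"
  else none

def map_to_iet_exchange_category (category : Option String) (food_name : String) : Option String :=
  match category with
  | none => pvInferA food_name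
  | some c =>
    if c = "" then pvInferA food_name           -- `not category` is also true for ""
    else
      let normalized := PySem.Str.replace (PySem.Str.lower (PySem.Str.strip c)) " " "_"
      let iet_category := PySem.Dict.getD CSV_EXCHANGE_TO_IET_CATEGORY normalized none
      if iet_category = some "vegetable_non_starchy" then
        let food_lower := if food_name ≠ "" then PySem.Str.lower food_name else ""
        if STARCHY_VEGETABLES.any (fun veg => PySem.Str.isIn veg food_lower) then some "vegetable_starchy"
        else iet_category
      else iet_category

-- ===== PORT B =====
def IET_CATEGORIES : List String :=
  ["vegetable_starchy", "cereal", "pulse", "milk", "fruit", "nuts_seeds", "fat"]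

-- one flat keyword → priority-rank association list (Python dict KEYWORD_RANK)
def KEYWORD_RANK : List (String × Nat) := [
  ("potato", 0), ("sweet potato", 0), ("yam", 0), ("taro", 0), ("arbi", 0), ("colocasia", 0),
  ("rice", 1), ("wheat", 1), ("oats", 1), ("millet", 1), ("bajra", 1), ("jowar", 1),
  ("ragi", 1), ("roti", 1), ("bread", 1),
  ("dal", 2), ("lentil", 2), ("chana", 2), ("rajma", 2), ("moong", 2), ("masoor", 2), ("toor", 2),
  ("milk", 3), ("curd", 3), ("yogurt", 3), ("buttermilk", 3), ("paneer", 3), ("cheese", 3),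
  ("apple", 4), ("banana", 4), ("orange", 4), ("papaya", 4), ("mango", 4), ("guava", 4),
  ("almond", 5), ("peanut", 5), ("walnut", 5), ("cashew", 5), ("seed", 5),
  ("oil", 6), ("ghee", 6), ("butter", 6)]

-- loop body of B's aggregation pass: `best = rank if best is None else min(best, rank)` on a hit
def pvStep (food_lower : String) (best : Option Nat) (p : String × Nat) : Option Nat :=
  if PySem.Str.isIn p.1 food_lower then
    some (match best with | none => p.2 | some a => min a p.2)
  else best

def map_to_iet_exchange_category_alt (category : Option String) (food_name : String) : Option String :=
  let food_lower := PySem.Str.lower food_name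
  let best := KEYWORD_RANK.foldl (pvStep food_lower) none
  match category with
  | none =>
    (match best with  -- IET_CATEGORIES[best] if best is not None else None (index always in range)
     | some r => PySem.List.pyGet? IET_CATEGORIES (Int.ofNat r)
     | none => none)
  | some c =>
    if c = "" then
      (match best with
       | some r => PySem.List.pyGet? IET_CATEGORIES (Int.ofNat r)
       | none => none)
    else
      let iet := PySem.Dict.getD CSV_EXCHANGE_TO_IET_CATEGORY
        (PySem.Str.replace (PySem.Str.lower (PySem.Str.strip c)) " " "_") none
      if iet = some "vegetable_non_starchy" ∧ best = some 0 then some "vegetable_starchy"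
      else iet

-- ===== PRECONDITION & SPEC =====
def Spec_map_to_iet_exchange_category (category : Option String) (food_name : String) (out : Option String) : Prop := out = map_to_iet_exchange_category_alt category food_name
instance (category : Option String) (food_name : String) (out : Option String) : Decidable (Spec_map_to_iet_exchange_category category food_name out) := by unfold Spec_map_to_iet_exchange_category; infer_instance

-- ===== CLAIM (what is proved, stated in full; the proofs are below) =====
def Claim_equal_map_to_iet_exchange_category : Prop := ∀ (category : Option String) (food_name : String), Dom_map_to_iet_exchange_category category food_name → Spec_map_to_iet_exchange_category category food_name (map_to_iet_exchange_category category food_name)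

-- ===== LEMMAS AND PROOFS =====

-- A's `food_name.lower() if food_name else ""` equals plain `food_name.lower()`
theorem pv_lower_guard (s : String) :
    (if s ≠ "" then PySem.Str.lower s else "") = PySem.Str.lower s := by
  by_cases h : s = "" <;> simp [h, PySem.Str.lower, PySem.Chars.lower]

-- folding one rank-i keyword group from an accumulator already ≤ i leaves it unchanged
theorem pv_fold_stay (fl : String) (kws : List String) (i a : Nat) (h : a ≤ i) :
    (kws.map (fun k => (k, i))).foldl (pvStep fl) (some a) = some a := by
  induction kws with
  | nil => rfl
  | cons k ks ih =>
    rw [List.map_cons, List.foldl_cons]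
    have hstep : pvStep fl (some a) (k, i) = some a := by
      simp only [pvStep]
      by_cases hk : PySem.Str.isIn k fl = true
      · rw [if_pos hk]; simp [Nat.min_eq_left h]
      · rw [if_neg hk]
    rw [hstep, ih]

-- folding one rank-i keyword group from none yields `some i` iff the group has a hit
theorem pv_fold_none (fl : String) (kws : List String) (i : Nat) :
    (kws.map (fun k => (k, i))).foldl (pvStep fl) none =
      if kws.any (fun k => PySem.Str.isIn k fl) then some i else none := by
  induction kws with
  | nil => rfl
  | cons k ks ih =>
    rw [List.map_cons, List.foldl_cons, List.any_cons]
    by_cases hk : PySem.Str.isIn k fl = true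
    · have hstep : pvStep fl none (k, i) = some i := by
        simp only [pvStep]; rw [if_pos hk]
      rw [hstep, pv_fold_stay fl ks i i (Nat.le_refl i), hk, Bool.true_or, if_pos rfl]
    · have hk' : PySem.Str.isIn k fl = false := by
        exact Bool.eq_false_iff.mpr hk
      have hstep : pvStep fl none (k, i) = none := by
        simp only [pvStep]; rw [if_neg hk]
      rw [hstep, ih, hk', Bool.false_or]

-- the flat map is the 7 rank-tagged keyword groups in priority order
theorem pv_keyword_rank_eq :
    KEYWORD_RANK =
      STARCHY_VEGETABLES.map (fun k => (k, 0)) ++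
      (["rice", "wheat", "oats", "millet", "bajra", "jowar", "ragi", "roti", "bread"] : List String).map (fun k => (k, 1)) ++
      (["dal", "lentil", "chana", "rajma", "moong", "masoor", "toor"] : List String).map (fun k => (k, 2)) ++
      (["milk", "curd", "yogurt", "buttermilk", "paneer", "cheese"] : List String).map (fun k => (k, 3)) ++
      (["apple", "banana", "orange", "papaya", "mango", "guava"] : List String).map (fun k => (k, 4)) ++
      (["almond", "peanut", "walnut", "cashew", "seed"] : List String).map (fun k => (k, 5)) ++
      (["oil", "ghee", "butter"] : List String).map (fun k => (k, 6)) := rfl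

-- the aggregated minimum rank, characterised by the seven group-hit conditions
theorem pv_best_char (fl : String) :
    KEYWORD_RANK.foldl (pvStep fl) none =
      if STARCHY_VEGETABLES.any (fun k => PySem.Str.isIn k fl) then some 0
      else if (["rice", "wheat", "oats", "millet", "bajra", "jowar", "ragi", "roti", "bread"] : List String).any (fun k => PySem.Str.isIn k fl) then some 1
      else if (["dal", "lentil", "chana", "rajma", "moong", "masoor", "toor"] : List String).any (fun k => PySem.Str.isIn k fl) then some 2
      else if (["milk", "curd", "yogurt", "buttermilk", "paneer", "cheese"] : List String).any (fun k => PySem.Str.isIn k fl) then some 3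
      else if (["apple", "banana", "orange", "papaya", "mango", "guava"] : List String).any (fun k => PySem.Str.isIn k fl) then some 4
      else if (["almond", "peanut", "walnut", "cashew", "seed"] : List String).any (fun k => PySem.Str.isIn k fl) then some 5
      else if (["oil", "ghee", "butter"] : List String).any (fun k => PySem.Str.isIn k fl) then some 6
      else none := by
  rw [pv_keyword_rank_eq]
  simp only [List.foldl_append]
  rw [pv_fold_none]
  by_cases h0 : STARCHY_VEGETABLES.any (fun k => PySem.Str.isIn k fl)
  · simp only [h0, if_true,
      pv_fold_stay fl _ 1 0 (by omega), pv_fold_stay fl _ 2 0 (by omega),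
      pv_fold_stay fl _ 3 0 (by omega), pv_fold_stay fl _ 4 0 (by omega),
      pv_fold_stay fl _ 5 0 (by omega), pv_fold_stay fl _ 6 0 (by omega)]
  · rw [if_neg h0, if_neg h0, pv_fold_none]
    by_cases h1 : (["rice", "wheat", "oats", "millet", "bajra", "jowar", "ragi", "roti", "bread"] : List String).any (fun k => PySem.Str.isIn k fl)
    · simp only [h1, if_true,
        pv_fold_stay fl _ 2 1 (by omega), pv_fold_stay fl _ 3 1 (by omega),
        pv_fold_stay fl _ 4 1 (by omega), pv_fold_stay fl _ 5 1 (by omega),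
        pv_fold_stay fl _ 6 1 (by omega)]
    · rw [if_neg h1, if_neg h1, pv_fold_none]
      by_cases h2 : (["dal", "lentil", "chana", "rajma", "moong", "masoor", "toor"] : List String).any (fun k => PySem.Str.isIn k fl)
      · simp only [h2, if_true,
          pv_fold_stay fl _ 3 2 (by omega), pv_fold_stay fl _ 4 2 (by omega),
          pv_fold_stay fl _ 5 2 (by omega), pv_fold_stay fl _ 6 2 (by omega)]
      · rw [if_neg h2, if_neg h2, pv_fold_none]
        by_cases h3 : (["milk", "curd", "yogurt", "buttermilk", "paneer", "cheese"] : List String).any (fun k => PySem.Str.isIn k fl)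
        · simp only [h3, if_true,
            pv_fold_stay fl _ 4 3 (by omega), pv_fold_stay fl _ 5 3 (by omega),
            pv_fold_stay fl _ 6 3 (by omega)]
        · rw [if_neg h3, if_neg h3, pv_fold_none]
          by_cases h4 : (["apple", "banana", "orange", "papaya", "mango", "guava"] : List String).any (fun k => PySem.Str.isIn k fl)
          · simp only [h4, if_true,
              pv_fold_stay fl _ 5 4 (by omega), pv_fold_stay fl _ 6 4 (by omega)]
          · rw [if_neg h4, if_neg h4, pv_fold_none]
            by_cases h5 : (["almond", "peanut", "walnut", "cashew", "seed"] : List String).any (fun k => PySem.Str.isIn k fl)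
            · simp only [h5, if_true, pv_fold_stay fl _ 6 5 (by omega)]
            · rw [if_neg h5, if_neg h5, pv_fold_none]

-- the inference branches agree: A's if cascade = B's minimum-rank lookup
theorem pv_infer_eq (food_name : String) :
    pvInferA food_name =
      (match KEYWORD_RANK.foldl (pvStep (PySem.Str.lower food_name)) none with
       | some r => PySem.List.pyGet? IET_CATEGORIES (Int.ofNat r)
       | none => none) := by
  simp only [pvInferA, pv_lower_guard, pv_best_char]
  split_ifs <;> rfl

-- A's starchy-refinement test equals B's `best = some 0`
theorem pv_starchy_eq (fl : String) :
    (STARCHY_VEGETABLES.any (fun k => PySem.Str.isIn k fl)) =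
      decide (KEYWORD_RANK.foldl (pvStep fl) none = some (0 : Nat)) := by
  rw [pv_best_char]
  split_ifs with h0 h1 h2 h3 h4 h5 h6 <;> simp_all

-- ===== VERDICT (by name: the statement is the Claim_ definition above) =====
theorem map_to_iet_exchange_category_spec : Claim_equal_map_to_iet_exchange_category := by
  intro category food_name _
  unfold Spec_map_to_iet_exchange_category map_to_iet_exchange_category map_to_iet_exchange_category_alt
  cases category with
  | none => exact pv_infer_eq food_name
  | some c =>
    dsimp only
    by_cases hc : c = ""
    · rw [if_pos hc, if_pos hc]
      exact pv_infer_eq food_name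
    · rw [if_neg hc, if_neg hc]
      simp only [pv_lower_guard]
      by_cases hi :
          PySem.Dict.getD CSV_EXCHANGE_TO_IET_CATEGORY
            (PySem.Str.replace (PySem.Str.lower (PySem.Str.strip c)) " " "_") none =
            some "vegetable_non_starchy"
      · rw [if_pos hi]
        have hs := pv_starchy_eq (PySem.Str.lower food_name)
        by_cases hb : KEYWORD_RANK.foldl (pvStep (PySem.Str.lower food_name)) none = some (0 : Nat)
        · rw [if_pos (hs.trans (by rw [hb]; rfl)), if_pos ⟨hi, hb⟩]
        · rw [if_neg (by rw [hs]; simp only [decide_eq_true_eq]; exact hb),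
            if_neg (fun h => hb h.2)]
      · rw [if_neg hi, if_neg (by simp [hi])]
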